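-- pv_equiv track=rewrite | github.com/Kevin-smt/openalgo-kevin | restx_api/local_orderbook.py | _build_local_statistics
-- ===== SOURCE A (Python) =====
-- def _build_local_statistics(orders: list[dict]) -> dict[str, int]:
--     stats = {
--         "total_orders": len(orders),
--         "open_orders": 0,
--         "complete_orders": 0,
--         "cancelled_orders": 0,
--         "rejected_orders": 0,
--         "buy_orders": 0,
--         "sell_orders": 0,
--     }
--     for order in orders:
--         status = str(order.get("order_status") or "").lower()
--         action = str(order.get("action") or "").upper()
--         if status == "open":
--             stats["open_orders"] += 1
--         elif status == "complete":
--             stats["complete_orders"] += 1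
--         elif status == "cancelled":
--             stats["cancelled_orders"] += 1
--         elif status == "rejected":
--             stats["rejected_orders"] += 1
--         if action == "BUY":
--             stats["buy_orders"] += 1
--         elif action == "SELL":
--             stats["sell_orders"] += 1
--     return stats
-- ===== SOURCE B (Python) =====
-- def _build_local_statistics(orders: list[dict]) -> dict[str, int]:
--     statuses = [str(o.get("order_status") or "").lower() for o in orders]
--     actions = [str(o.get("action") or "").upper() for o in orders]
--     return {
--         "total_orders": len(orders),
--         "open_orders": statuses.count("open"),
--         "complete_orders": statuses.count("complete"),
--         "cancelled_orders": statuses.count("cancelled"),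
--         "rejected_orders": statuses.count("rejected"),
--         "buy_orders": actions.count("BUY"),
--         "sell_orders": actions.count("SELL"),
--     }
-- ===== Notes on version B (the rewrite author's own statement) =====
-- stated objective: idiomatic
-- what changed: Replaces the single loop with inline if/elif counter increments on a pre-built dict by mapping each order to its normalized status/action once and building the result dict directly from list.count of the specific keys.
import Mathlib
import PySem

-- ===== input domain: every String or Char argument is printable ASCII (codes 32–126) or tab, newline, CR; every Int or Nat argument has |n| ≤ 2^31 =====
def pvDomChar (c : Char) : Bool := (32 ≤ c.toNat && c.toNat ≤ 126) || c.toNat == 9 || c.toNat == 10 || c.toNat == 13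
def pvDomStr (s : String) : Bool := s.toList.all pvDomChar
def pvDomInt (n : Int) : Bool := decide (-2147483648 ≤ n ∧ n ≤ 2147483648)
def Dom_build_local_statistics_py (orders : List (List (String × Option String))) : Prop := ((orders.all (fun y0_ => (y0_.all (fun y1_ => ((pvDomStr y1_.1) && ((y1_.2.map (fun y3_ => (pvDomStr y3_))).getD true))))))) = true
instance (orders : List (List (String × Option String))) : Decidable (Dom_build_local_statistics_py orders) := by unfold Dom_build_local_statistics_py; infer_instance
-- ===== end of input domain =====

-- B replaces A's per-order if/elif counter increments by mapping orders to normalized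
-- status/action lists once and reading the result off with list.count (idiomatic; same cost).

-- ===== PORT A =====
-- str(order.get("order_status") or "").lower()  (both Pythons contain this very expression)
def pvNormS (o : List (String × Option String)) : String :=
  PySem.Str.lower (((PySem.Dict.mk o).get? "order_status").join.getD "")

-- str(order.get("action") or "").upper()
def pvNormA (o : List (String × Option String)) : String :=
  PySem.Str.upper (((PySem.Dict.mk o).get? "action").join.getD "")

-- the body of A's for-loop: if/elif on status, then if/elif on action
def pvStepA (d : PySem.Dict String Int) (o : List (String × Option String)) : PySem.Dict String Int :=
  let status := pvNormS o
  let action := pvNormA o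
  let d1 :=
    if status = "open" then d.modify "open_orders" 0 (· + 1)
    else if status = "complete" then d.modify "complete_orders" 0 (· + 1)
    else if status = "cancelled" then d.modify "cancelled_orders" 0 (· + 1)
    else if status = "rejected" then d.modify "rejected_orders" 0 (· + 1)
    else d
  if action = "BUY" then d1.modify "buy_orders" 0 (· + 1)
  else if action = "SELL" then d1.modify "sell_orders" 0 (· + 1)
  else d1

def build_local_statistics_py (orders : List (List (String × Option String))) : List (String × Int) :=
  (orders.foldl pvStepA (PySem.Dict.mk
    [("total_orders", PySem.List.len orders),
     ("open_orders", 0), ("complete_orders", 0), ("cancelled_orders", 0),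
     ("rejected_orders", 0), ("buy_orders", 0), ("sell_orders", 0)])).items

-- ===== PORT B =====
def build_local_statistics_py_alt (orders : List (List (String × Option String))) : List (String × Int) :=
  let statuses := orders.map pvNormS
  let actions := orders.map pvNormA
  [("total_orders", PySem.List.len orders),
   ("open_orders", (statuses.count "open" : Int)),
   ("complete_orders", (statuses.count "complete" : Int)),
   ("cancelled_orders", (statuses.count "cancelled" : Int)),
   ("rejected_orders", (statuses.count "rejected" : Int)),
   ("buy_orders", (actions.count "BUY" : Int)),
   ("sell_orders", (actions.count "SELL" : Int))]

-- ===== PRECONDITION & SPEC =====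
def Spec_build_local_statistics_py (orders : List (List (String × Option String))) (out : List (String × Int)) : Prop := out = build_local_statistics_py_alt orders
instance (orders : List (List (String × Option String))) (out : List (String × Int)) : Decidable (Spec_build_local_statistics_py orders out) := by unfold Spec_build_local_statistics_py; infer_instance

-- ===== CLAIM (what is proved, stated in full; the proofs are below) =====
def Claim_equal_build_local_statistics_py : Prop := ∀ (orders : List (List (String × Option String))), Dom_build_local_statistics_py orders → Spec_build_local_statistics_py orders (build_local_statistics_py orders)

-- ===== LEMMAS AND PROOFS =====
theorem pvm_open_orders (t o c ca r b s : Int) :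
    (PySem.Dict.mk [("total_orders", t), ("open_orders", o), ("complete_orders", c), ("cancelled_orders", ca), ("rejected_orders", r), ("buy_orders", b), ("sell_orders", s)]).modify "open_orders" 0 (· + 1) = PySem.Dict.mk [("total_orders", t), ("open_orders", o + 1), ("complete_orders", c), ("cancelled_orders", ca), ("rejected_orders", r), ("buy_orders", b), ("sell_orders", s)] := by
  simp [PySem.Dict.modify, PySem.Dict.insert, PySem.Dict.getD, PySem.Dict.get?, PySem.Dict.contains]

theorem pvm_complete_orders (t o c ca r b s : Int) :
    (PySem.Dict.mk [("total_orders", t), ("open_orders", o), ("complete_orders", c), ("cancelled_orders", ca), ("rejected_orders", r), ("buy_orders", b), ("sell_orders", s)]).modify "complete_orders" 0 (· + 1) = PySem.Dict.mk [("total_orders", t), ("open_orders", o), ("complete_orders", c + 1), ("cancelled_orders", ca), ("rejected_orders", r), ("buy_orders", b), ("sell_orders", s)] := by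
  simp [PySem.Dict.modify, PySem.Dict.insert, PySem.Dict.getD, PySem.Dict.get?, PySem.Dict.contains]

theorem pvm_cancelled_orders (t o c ca r b s : Int) :
    (PySem.Dict.mk [("total_orders", t), ("open_orders", o), ("complete_orders", c), ("cancelled_orders", ca), ("rejected_orders", r), ("buy_orders", b), ("sell_orders", s)]).modify "cancelled_orders" 0 (· + 1) = PySem.Dict.mk [("total_orders", t), ("open_orders", o), ("complete_orders", c), ("cancelled_orders", ca + 1), ("rejected_orders", r), ("buy_orders", b), ("sell_orders", s)] := by
  simp [PySem.Dict.modify, PySem.Dict.insert, PySem.Dict.getD, PySem.Dict.get?, PySem.Dict.contains]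

theorem pvm_rejected_orders (t o c ca r b s : Int) :
    (PySem.Dict.mk [("total_orders", t), ("open_orders", o), ("complete_orders", c), ("cancelled_orders", ca), ("rejected_orders", r), ("buy_orders", b), ("sell_orders", s)]).modify "rejected_orders" 0 (· + 1) = PySem.Dict.mk [("total_orders", t), ("open_orders", o), ("complete_orders", c), ("cancelled_orders", ca), ("rejected_orders", r + 1), ("buy_orders", b), ("sell_orders", s)] := by
  simp [PySem.Dict.modify, PySem.Dict.insert, PySem.Dict.getD, PySem.Dict.get?, PySem.Dict.contains]

theorem pvm_buy_orders (t o c ca r b s : Int) :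
    (PySem.Dict.mk [("total_orders", t), ("open_orders", o), ("complete_orders", c), ("cancelled_orders", ca), ("rejected_orders", r), ("buy_orders", b), ("sell_orders", s)]).modify "buy_orders" 0 (· + 1) = PySem.Dict.mk [("total_orders", t), ("open_orders", o), ("complete_orders", c), ("cancelled_orders", ca), ("rejected_orders", r), ("buy_orders", b + 1), ("sell_orders", s)] := by
  simp [PySem.Dict.modify, PySem.Dict.insert, PySem.Dict.getD, PySem.Dict.get?, PySem.Dict.contains]

theorem pvm_sell_orders (t o c ca r b s : Int) :
    (PySem.Dict.mk [("total_orders", t), ("open_orders", o), ("complete_orders", c), ("cancelled_orders", ca), ("rejected_orders", r), ("buy_orders", b), ("sell_orders", s)]).modify "sell_orders" 0 (· + 1) = PySem.Dict.mk [("total_orders", t), ("open_orders", o), ("complete_orders", c), ("cancelled_orders", ca), ("rejected_orders", r), ("buy_orders", b), ("sell_orders", s + 1)] := by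
  simp [PySem.Dict.modify, PySem.Dict.insert, PySem.Dict.getD, PySem.Dict.get?, PySem.Dict.contains]

-- A's fold over any start values of the seven counters yields those values plus the counts.
theorem pv_fold (l : List (List (String × Option String))) (t o c ca r b s : Int) :
    l.foldl pvStepA (PySem.Dict.mk
      [("total_orders", t), ("open_orders", o), ("complete_orders", c),
       ("cancelled_orders", ca), ("rejected_orders", r), ("buy_orders", b), ("sell_orders", s)]) =
    PySem.Dict.mk
      [("total_orders", t),
       ("open_orders", o + ((l.map pvNormS).count "open" : Int)),
       ("complete_orders", c + ((l.map pvNormS).count "complete" : Int)),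
       ("cancelled_orders", ca + ((l.map pvNormS).count "cancelled" : Int)),
       ("rejected_orders", r + ((l.map pvNormS).count "rejected" : Int)),
       ("buy_orders", b + ((l.map pvNormA).count "BUY" : Int)),
       ("sell_orders", s + ((l.map pvNormA).count "SELL" : Int))] := by
  induction l generalizing t o c ca r b s with
  | nil => simp
  | cons x l ih =>
    simp only [List.foldl_cons, pvStepA]
    split_ifs <;>
      simp only [pvm_open_orders, pvm_complete_orders, pvm_cancelled_orders,
        pvm_rejected_orders, pvm_buy_orders, pvm_sell_orders, ih] <;>
      simp_all <;> (try constructor) <;> ring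

-- ===== VERDICT (by name: the statement is the Claim_ definition above) =====
theorem build_local_statistics_py_spec : Claim_equal_build_local_statistics_py := by
  intro orders _
  show build_local_statistics_py orders = build_local_statistics_py_alt orders
  unfold build_local_statistics_py build_local_statistics_py_alt
  rw [pv_fold]
  simp
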